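-- pv_equiv track=rewrite | github.com/EwhaKing/King-CodingTest-Study | minnkyoung/Epper_주울 수 있는 최대의 돈.py | solution
-- ===== SOURCE A (Python) =====
-- def solution(n, M):
--     dp=[0]*30001
--     dp[1]=M[0]
--     if n > 1 :
--         dp[2]=M[0]+M[1]
--     if n > 2 :
--
--         for i in range(3,n+1):
--             dp[i]=max(dp[i-1], dp[i-2] + M[i-1],
--             dp[i-3] + M[i-2] + M[i-1])
--     return dp[n]
-- ===== SOURCE B (Python) =====
-- def solution(n, M):
--     # Dual formulation: maximum money kept = total money of M[:n] minus the
--     # minimum money left behind (a min-DP over the dropped elements).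
--     if n <= 0:
--         return 0
--     if n <= 2:
--         return sum(M[:n])
--     total = sum(M[:n])
--     skips = [0, 0, 0]
--     for i in range(2, n):
--         skips = [skips[1], skips[2],
--                  min(skips[0] + M[i - 2], skips[1] + M[i - 1], skips[2] + M[i])]
--     return total - skips[2]
-- ===== Notes on version B (the rewrite author's own statement) =====
-- stated objective: alternative
-- what changed: Replaces A's direct max-DP over a fixed 30001-entry table with the dual formulation: compute the total of M[:n] once and subtract a min-DP over the money left behind (minimum skipped sum), with no table and early returns for n<=2.
-- intended difference: For n = -30000 (with M[0] != 0) A's return dp[n] hits slot 1 of the 30001-entry table by Python negative-index wraparound and returns M[0]; B returns 0, the intended value for a non-positive count of pickable items (A itself returns 0 for every other non-positive n). — e.g. on solution(-30000, [5]): A returns 5, B returns 0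
import Mathlib
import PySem

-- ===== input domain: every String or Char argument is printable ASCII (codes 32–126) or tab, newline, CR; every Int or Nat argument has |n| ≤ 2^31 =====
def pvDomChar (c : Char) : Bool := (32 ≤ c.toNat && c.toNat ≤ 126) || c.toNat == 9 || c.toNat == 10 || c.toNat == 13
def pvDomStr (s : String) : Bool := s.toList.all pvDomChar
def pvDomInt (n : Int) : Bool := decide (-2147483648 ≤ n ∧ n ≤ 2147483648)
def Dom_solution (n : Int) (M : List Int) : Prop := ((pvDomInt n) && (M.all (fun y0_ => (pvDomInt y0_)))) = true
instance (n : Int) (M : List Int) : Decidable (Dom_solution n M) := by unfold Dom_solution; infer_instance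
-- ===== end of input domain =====

-- B is the dual algorithm: total of M[:n] minus a min-DP over the money left behind,
-- instead of A's direct max-DP over a fixed 30001-entry table (objective: alternative).

-- ===== PORT A =====
def solution (n : Int) (M : List Int) : Int :=
  let dp0 := List.replicate 30001 (0 : Int)
  let dp1 := PySem.List.pySetD dp0 1 (PySem.List.pyGetD M 0 0)
  let dp2 := if 1 < n then
      PySem.List.pySetD dp1 2 (PySem.List.pyGetD M 0 0 + PySem.List.pyGetD M 1 0)
    else dp1
  let dp3 := if 2 < n then
      (PySem.List.pyRange 3 (n + 1) 1).foldl (fun dp i =>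
        PySem.List.pySetD dp i
          (max (max (PySem.List.pyGetD dp (i - 1) 0)
                    (PySem.List.pyGetD dp (i - 2) 0 + PySem.List.pyGetD M (i - 1) 0))
               (PySem.List.pyGetD dp (i - 3) 0 + PySem.List.pyGetD M (i - 2) 0
                  + PySem.List.pyGetD M (i - 1) 0))) dp2
    else dp2
  PySem.List.pyGetD dp3 n 0

-- ===== PORT B =====
def solution_alt (n : Int) (M : List Int) : Int :=
  if n ≤ 0 then 0
  else if n ≤ 2 then (PySem.List.slice M none (some n)).sum
  else
    let total := (PySem.List.slice M none (some n)).sum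
    let s := (PySem.List.pyRange 2 n 1).foldl
      (fun (s : Int × Int × Int) i =>
        (s.2.1, s.2.2,
          min (min (s.1 + PySem.List.pyGetD M (i - 2) 0)
                   (s.2.1 + PySem.List.pyGetD M (i - 1) 0))
              (s.2.2 + PySem.List.pyGetD M i 0)))
      (0, 0, 0)
    total - s.2.2

-- ===== PRECONDITION & SPEC =====
-- Pre_ admits exactly the inputs where Python A returns: M nonempty (dp[1]=M[0] is
-- unconditional), -30001 ≤ n ≤ 30000 (else dp[n]/dp[i] raises IndexError on the
-- 30001-slot table), and n ≤ len(M) when n > 1 (else M[i-1] raises IndexError).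
def Pre_solution (n : Int) (M : List Int) : Prop :=
  M ≠ [] ∧ -30001 ≤ n ∧ n ≤ 30000 ∧ (1 < n → n ≤ (M.length : Int))
instance (n : Int) (M : List Int) : Decidable (Pre_solution n M) := by unfold Pre_solution; infer_instance
def pvWitness_solution : Int × List Int := (3, [1, 9, 2])

-- For n = -30000 (with M[0] ≠ 0) A's dp[n] hits slot 1 of the 30001-entry table by
-- Python negative-index wraparound and returns M[0]; B returns 0, the intended value
-- for a non-positive count (A itself returns 0 for every other non-positive n).
def D_solution (n : Int) (M : List Int) : Prop := n = -30000 ∧ M.getD 0 0 ≠ 0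
instance (n : Int) (M : List Int) : Decidable (D_solution n M) := by unfold D_solution; infer_instance

def Spec_solution (n : Int) (M : List Int) (out : Int) : Prop :=
  ¬ D_solution n M → out = solution_alt n M
instance (n : Int) (M : List Int) (out : Int) : Decidable (Spec_solution n M out) := by unfold Spec_solution; infer_instance

def pvDiffWitness_solution : Int × List Int := (-30000, [5])
def pvDiffWitnessOut_solution : Int × Int := (5, 0)

-- ===== CLAIM (what is proved, stated in full; the proofs are below) =====
def Claim_unchanged_solution : Prop := ∀ (n : Int) (M : List Int), Dom_solution n M → Pre_solution n M → Spec_solution n M (solution n M)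
def Claim_changed_solution : Prop := Dom_solution (pvDiffWitness_solution.1) (pvDiffWitness_solution.2) ∧ Pre_solution (pvDiffWitness_solution.1) (pvDiffWitness_solution.2) ∧ D_solution (pvDiffWitness_solution.1) (pvDiffWitness_solution.2) ∧ solution (pvDiffWitness_solution.1) (pvDiffWitness_solution.2) = pvDiffWitnessOut_solution.1 ∧ solution_alt (pvDiffWitness_solution.1) (pvDiffWitness_solution.2) = pvDiffWitnessOut_solution.2 ∧ pvDiffWitnessOut_solution.1 ≠ pvDiffWitnessOut_solution.2
def Claim_exact_solution : Prop := ∀ (n : Int) (M : List Int), Dom_solution n M → Pre_solution n M → D_solution n M → solution n M ≠ solution_alt n M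

-- ===== LEMMAS AND PROOFS =====

-- reference recurrence: refD M i = A's dp[i] (for 0 ≤ i ≤ n)
def refD (M : List Int) : Nat → Int
  | 0 => 0
  | 1 => M.getD 0 0
  | 2 => M.getD 0 0 + M.getD 1 0
  | (k + 3) =>
      max (max (refD M (k + 2)) (refD M (k + 1) + M.getD (k + 2) 0))
          (refD M k + M.getD (k + 1) 0 + M.getD (k + 2) 0)

-- B's dual recurrence: eD M i = minimum total of the money left behind among M[:i]
def eD (M : List Int) : Nat → Int
  | 0 => 0
  | 1 => 0
  | 2 => 0
  | (k + 3) =>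
      min (min (eD M k + M.getD k 0) (eD M (k + 1) + M.getD (k + 1) 0))
          (eD M (k + 2) + M.getD (k + 2) 0)

theorem base_get (M : List Int) (n : Int) (h1 : -30001 ≤ n) (h2 : n ≤ 0) :
    PySem.List.pyGetD ((List.replicate 30001 (0 : Int)).set 1 (M.getD 0 0)) n 0
      = if n = -30000 then M.getD 0 0 else 0 := by
  have hlen : ((List.replicate 30001 (0 : Int)).set 1 (M.getD 0 0)).length = 30001 := by
    rw [List.length_set, List.length_replicate]
  rcases eq_or_lt_of_le h2 with h0 | hneg
  · subst h0
    rw [PySem.List.pyGetD_zero]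
    rw [List.getD_eq_getElem?_getD, List.getElem?_set]
    rw [if_neg (by omega : ¬ (1 = 0))]
    rw [List.getElem?_replicate]
    rw [if_pos (by omega : (0:Nat) < 30001)]
    rw [if_neg (by omega : ¬ ((0:Int) = -30000))]
    rfl
  · have hk1 : 0 < (-n).toNat := by omega
    have hk2 : (-n).toNat ≤ ((List.replicate 30001 (0 : Int)).set 1 (M.getD 0 0)).length := by omega
    have hn : n = -(((-n).toNat : Nat) : Int) := by omega
    rw [hn, PySem.List.pyGetD_neg_natCast _ _ _ hk1 hk2]
    rw [List.getElem_set]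
    by_cases hc : (-n).toNat = 30000
    · rw [if_pos (by omega)]
      rw [if_pos (by omega)]
    · rw [if_neg (by omega)]
      rw [List.getElem_replicate]
      rw [if_neg (by omega)]

theorem a_loop (M : List Int) (m : Nat) (h2 : 2 ≤ m) (h30 : m ≤ 30000) :
    ((PySem.List.pyRange 3 ((m : Int) + 1) 1).foldl (fun dp i =>
        PySem.List.pySetD dp i
          (max (max (PySem.List.pyGetD dp (i - 1) 0)
                    (PySem.List.pyGetD dp (i - 2) 0 + PySem.List.pyGetD M (i - 1) 0))
               (PySem.List.pyGetD dp (i - 3) 0 + PySem.List.pyGetD M (i - 2) 0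
                  + PySem.List.pyGetD M (i - 1) 0)))
        (((List.replicate 30001 (0 : Int)).set 1 (M.getD 0 0)).set 2 (M.getD 0 0 + M.getD 1 0))).length = 30001
    ∧ ∀ j : Nat, j ≤ m →
      ((PySem.List.pyRange 3 ((m : Int) + 1) 1).foldl (fun dp i =>
        PySem.List.pySetD dp i
          (max (max (PySem.List.pyGetD dp (i - 1) 0)
                    (PySem.List.pyGetD dp (i - 2) 0 + PySem.List.pyGetD M (i - 1) 0))
               (PySem.List.pyGetD dp (i - 3) 0 + PySem.List.pyGetD M (i - 2) 0
                  + PySem.List.pyGetD M (i - 1) 0)))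
        (((List.replicate 30001 (0 : Int)).set 1 (M.getD 0 0)).set 2 (M.getD 0 0 + M.getD 1 0))).getD j 0
        = refD M j := by
  induction m, h2 using Nat.le_induction with
  | base =>
      rw [PySem.List.pyRange_one_eq_nil (by omega)]
      constructor
      · rw [List.foldl_nil, List.length_set, List.length_set, List.length_replicate]
      · intro j hj
        rw [List.foldl_nil]
        interval_cases j
        · rw [List.getD_eq_getElem?_getD, List.getElem?_set, if_neg (by omega),
            List.getElem?_set, if_neg (by omega), List.getElem?_replicate,
            if_pos (by omega)]
          rfl
        · rw [List.getD_eq_getElem?_getD, List.getElem?_set, if_neg (by omega),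
            List.getElem?_set, if_pos rfl,
            if_pos (by rw [List.length_replicate]; omega)]
          rfl
        · rw [List.getD_eq_getElem?_getD, List.getElem?_set, if_pos rfl,
            if_pos (by rw [List.length_set, List.length_replicate]; omega)]
          rfl
  | succ m hm ih =>
      have ih' := ih (by omega)
      obtain ⟨ihlen, ihget⟩ := ih'
      have hsplit : PySem.List.pyRange 3 (((m+1 : Nat) : Int) + 1) 1
          = PySem.List.pyRange 3 ((m : Int) + 1) 1 ++ [(m : Int) + 1] := by
        have : (((m+1 : Nat) : Int) + 1) = ((m : Int) + 1) + 1 := by push_cast; ring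
        rw [this, PySem.List.pyRange_one_succ_right (by omega)]
      rw [hsplit, List.foldl_append]
      set arr := ((PySem.List.pyRange 3 ((m : Int) + 1) 1).foldl (fun dp i =>
        PySem.List.pySetD dp i
          (max (max (PySem.List.pyGetD dp (i - 1) 0)
                    (PySem.List.pyGetD dp (i - 2) 0 + PySem.List.pyGetD M (i - 1) 0))
               (PySem.List.pyGetD dp (i - 3) 0 + PySem.List.pyGetD M (i - 2) 0
                  + PySem.List.pyGetD M (i - 1) 0)))
        (((List.replicate 30001 (0 : Int)).set 1 (M.getD 0 0)).set 2 (M.getD 0 0 + M.getD 1 0))) with harr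
      simp only [List.foldl_cons, List.foldl_nil]
      have e1 : ((m : Int) + 1) - 1 = ((m : Nat) : Int) := by omega
      have e2 : ((m : Int) + 1) - 2 = (((m - 1 : Nat) : Nat) : Int) := by
        have : (1:Nat) ≤ m := by omega
        push_cast [this]; ring
      have e3 : ((m : Int) + 1) - 3 = (((m - 2 : Nat) : Nat) : Int) := by
        have : (2:Nat) ≤ m := by omega
        push_cast [this]; ring
      have e0 : ((m : Int) + 1) = (((m + 1 : Nat) : Nat) : Int) := by push_cast; ring
      rw [e1, e2, e3, e0, PySem.List.pySetD_natCast,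
        PySem.List.pyGetD_natCast, PySem.List.pyGetD_natCast, PySem.List.pyGetD_natCast,
        PySem.List.pyGetD_natCast, PySem.List.pyGetD_natCast]
      rw [ihget m (by omega), ihget (m-1) (by omega), ihget (m-2) (by omega)]
      have hval : refD M (m + 1)
          = max (max (refD M m) (refD M (m-1) + M.getD m 0))
              (refD M (m-2) + M.getD (m-1) 0 + M.getD m 0) := by
        have hm1 : m + 1 = (m - 2) + 3 := by omega
        rw [hm1]
        have ha : (m - 2) + 2 = m := by omega
        have hb : (m - 2) + 1 = m - 1 := by omega
        rw [refD, ha, hb]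
      constructor
      · rw [List.length_set, ihlen]
      · intro j hj
        rw [List.getD_eq_getElem?_getD, List.getElem?_set]
        by_cases hje : j = m + 1
        · rw [if_pos (by omega), if_pos (by rw [ihlen]; omega)]
          subst hje
          rw [hval]
          rfl
        · rw [if_neg (by omega), ← List.getD_eq_getElem?_getD]
          exact ihget j (by omega)

theorem a_eq_ref (n : Int) (M : List Int) (h2 : 2 < n) (h30 : n ≤ 30000)
    (_hlen : n ≤ (M.length : Int)) : solution n M = refD M n.toNat := by
  have hn : n = ((n.toNat : Nat) : Int) := by omega
  obtain ⟨len, get⟩ := a_loop M n.toNat (by omega) (by omega)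
  simp only [solution]
  rw [if_pos (by omega), if_pos (by omega)]
  rw [PySem.List.pySetD_of_nonneg _ _ (by norm_num),
      PySem.List.pySetD_of_nonneg _ _ (by norm_num)]
  simp only [show ((1:Int)).toNat = 1 from rfl, show ((2:Int)).toNat = 2 from rfl]
  rw [PySem.List.pyGetD_zero, PySem.List.pyGetD_ofNat']
  rw [hn, PySem.List.pyGetD_natCast]
  simp only [Int.toNat_natCast]
  exact get n.toNat le_rfl

-- prefix sums advance by getD (holds with no length hypothesis: past the end both sides stall)
theorem sum_take_succ (M : List Int) (j : Nat) :
    (M.take (j + 1)).sum = (M.take j).sum + M.getD j 0 := by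
  rw [List.take_add_one, List.sum_append, List.getD_eq_getElem?_getD]
  cases h : M[j]? with
  | none => simp
  | some v => simp

-- duality: the max kept and the min skipped of any prefix sum to that prefix's total
theorem ref_add_e (M : List Int) : ∀ k, refD M k + eD M k = (M.take k).sum := by
  intro k
  induction k using Nat.strong_induction_on with
  | _ k ih =>
    match k with
    | 0 => simp [refD, eD]
    | 1 =>
        have h0 := sum_take_succ M 0
        simp only [List.take_zero, List.sum_nil, zero_add] at h0
        simp only [refD, eD, add_zero]
        omega
    | 2 =>
        have h0 := sum_take_succ M 0
        have h1 := sum_take_succ M 1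
        simp only [List.take_zero, List.sum_nil, zero_add] at h0
        rw [show (1:Nat) + 1 = 2 from rfl] at h1
        simp only [refD, eD, add_zero]
        omega
    | (k + 3) =>
        have i0 := ih k (by omega)
        have i1 := ih (k + 1) (by omega)
        have i2 := ih (k + 2) (by omega)
        have s0 := sum_take_succ M k
        have s1 := sum_take_succ M (k + 1)
        have s2 := sum_take_succ M (k + 2)
        rw [show k + 1 + 1 = k + 2 from by omega] at s1
        rw [show k + 2 + 1 = k + 3 from by omega] at s2
        rw [refD, eD]
        omega

theorem b_loop (M : List Int) (m : Nat) (h2 : 2 ≤ m) :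
    ((PySem.List.pyRange 2 ((m : Int)) 1).foldl
      (fun (s : Int × Int × Int) i =>
        (s.2.1, s.2.2,
          min (min (s.1 + PySem.List.pyGetD M (i - 2) 0)
                   (s.2.1 + PySem.List.pyGetD M (i - 1) 0))
              (s.2.2 + PySem.List.pyGetD M i 0)))
      (0, 0, 0))
    = (eD M (m - 2), eD M (m - 1), eD M m) := by
  induction m, h2 using Nat.le_induction with
  | base =>
      rw [PySem.List.pyRange_one_eq_nil (by omega)]
      rfl
  | succ m hm ih =>
      have hsplit : PySem.List.pyRange 2 ((m + 1 : Nat) : Int) 1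
          = PySem.List.pyRange 2 ((m : Int)) 1 ++ [(m : Int)] := by
        have : ((m + 1 : Nat) : Int) = ((m : Int)) + 1 := by push_cast; ring
        rw [this, PySem.List.pyRange_one_succ_right (by omega)]
      rw [hsplit, List.foldl_append, ih]
      simp only [List.foldl_cons, List.foldl_nil]
      have e2 : ((m : Int)) - 2 = (((m - 2 : Nat) : Nat) : Int) := by omega
      have e1 : ((m : Int)) - 1 = (((m - 1 : Nat) : Nat) : Int) := by omega
      rw [e2, e1, PySem.List.pyGetD_natCast, PySem.List.pyGetD_natCast,
        PySem.List.pyGetD_natCast]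
      have hval : eD M (m + 1)
          = min (min (eD M (m - 2) + M.getD (m - 2) 0)
                  (eD M (m - 1) + M.getD (m - 1) 0))
              (eD M m + M.getD m 0) := by
        have hm1 : m + 1 = (m - 2) + 3 := by omega
        rw [hm1, eD]
        have ha : (m - 2) + 2 = m := by omega
        have hb : (m - 2) + 1 = m - 1 := by omega
        rw [ha, hb]
      have ga : m + 1 - 2 = m - 1 := by omega
      have gb : m + 1 - 1 = m := by omega
      rw [ga, gb, hval]

theorem b_eq_ref (n : Int) (M : List Int) (h1 : 0 < n) :
    solution_alt n M = refD M n.toNat := by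
  have hd := ref_add_e M n.toNat
  simp only [solution_alt]
  rw [if_neg (by omega)]
  by_cases h2 : n ≤ 2
  · rw [if_pos h2, PySem.List.slice_to _ (by omega)]
    interval_cases n
    · simp only [show ((1:Int)).toNat = 1 from rfl] at hd ⊢
      simp only [eD] at hd
      omega
    · simp only [show ((2:Int)).toNat = 2 from rfl] at hd ⊢
      simp only [eD] at hd
      omega
  · rw [if_neg h2, PySem.List.slice_to _ (by omega)]
    have hn : n = ((n.toNat : Nat) : Int) := by omega
    rw [hn, b_loop M n.toNat (by omega)]
    simp only [Int.toNat_natCast]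
    omega

theorem a_neg (n : Int) (M : List Int) (h1 : -30001 ≤ n) (h2 : n ≤ 0) :
    solution n M = if n = -30000 then M.getD 0 0 else 0 := by
  simp only [solution]
  rw [if_neg (by omega), if_neg (by omega)]
  rw [PySem.List.pySetD_of_nonneg _ _ (by norm_num)]
  rw [show ((1:Int)).toNat = 1 from rfl]
  rw [PySem.List.pyGetD_zero]
  exact base_get M n h1 h2

theorem a_one (M : List Int) : solution 1 M = M.getD 0 0 := by
  simp only [solution]
  rw [if_neg (by norm_num : ¬ ((1:Int) < 1)), if_neg (by norm_num : ¬ ((2:Int) < 1))]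
  rw [PySem.List.pySetD_of_nonneg _ _ (by norm_num)]
  rw [show ((1:Int)).toNat = 1 from rfl]
  rw [PySem.List.pyGetD_zero, PySem.List.pyGetD_ofNat']
  rw [List.getD_eq_getElem?_getD, List.getElem?_set, if_pos rfl,
    if_pos (by rw [List.length_replicate]; omega)]
  rfl

theorem a_two (M : List Int) : solution 2 M = M.getD 0 0 + M.getD 1 0 := by
  simp only [solution]
  rw [if_pos (by norm_num : (1:Int) < 2), if_neg (by norm_num : ¬ ((2:Int) < 2))]
  rw [PySem.List.pySetD_of_nonneg _ _ (by norm_num),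
      PySem.List.pySetD_of_nonneg _ _ (by norm_num)]
  simp only [show ((1:Int)).toNat = 1 from rfl, show ((2:Int)).toNat = 2 from rfl]
  rw [PySem.List.pyGetD_zero, PySem.List.pyGetD_ofNat', PySem.List.pyGetD_ofNat']
  rw [List.getD_eq_getElem?_getD, List.getElem?_set, if_pos rfl,
    if_pos (by rw [List.length_set, List.length_replicate]; omega)]
  rfl

-- ===== VERDICT (by name: the statement is the Claim_ definition above) =====
theorem solution_spec : Claim_unchanged_solution := by
  intro n M _hdom hpre hnd
  obtain ⟨hne, hlo, hhi, hlen⟩ := hpre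
  rcases lt_trichotomy n 1 with hc | hc | hc
  · -- n ≤ 0
    have h0 : n ≤ 0 := by omega
    rw [a_neg n M hlo h0]
    have hb : solution_alt n M = 0 := by
      simp only [solution_alt]
      rw [if_pos h0]
    rw [hb]
    by_cases h30 : n = -30000
    · have : M.getD 0 0 = 0 := by
        by_contra hne0
        exact hnd ⟨h30, hne0⟩
      rw [if_pos h30, this]
    · rw [if_neg h30]
  · -- n = 1
    subst hc
    rw [a_one, b_eq_ref 1 M (by omega)]
    rfl
  · -- 1 < n
    have hlen' : n ≤ (M.length : Int) := hlen hc
    rcases eq_or_lt_of_le (by omega : (2:Int) ≤ n) with h2 | h2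
    · rw [← h2, a_two, b_eq_ref 2 M (by omega)]
      rfl
    · rw [a_eq_ref n M h2 hhi hlen', b_eq_ref n M (by omega)]

theorem solution_changed : Claim_changed_solution := by
  unfold Claim_changed_solution
  refine ⟨by decide, by decide, by decide, ?_, ?_, by decide⟩
  · show solution (-30000) [5] = 5
    rw [a_neg (-30000) [5] (by omega) (by omega), if_pos rfl]
    rfl
  · show solution_alt (-30000) [5] = 0
    simp only [solution_alt]
    rw [if_pos (by norm_num : (-30000:Int) ≤ 0)]

theorem solution_tight : Claim_exact_solution := by
  intro n M _hdom hpre hd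
  obtain ⟨hne, hlo, hhi, _⟩ := hpre
  obtain ⟨h30, hne0⟩ := hd
  rw [a_neg n M hlo (by omega), if_pos h30]
  have hb : solution_alt n M = 0 := by
    simp only [solution_alt]
    rw [if_pos (by omega)]
  rw [hb]
  exact hne0
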